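-- pv_equiv track=rewrite | github.com/githaam/python-xss-scraper-old | program.py | scanning
-- ===== SOURCE A (Python) =====
-- def KMPSearch(pat, txt):
-- 	M = len(pat)
-- 	N = len(txt)
-- 	hasil = ""
--
-- 	# create lps[] that will hold the longest prefix suffix
-- 	# values for pattern
-- 	lps = [0]*M
-- 	j = 0 # index for pat[]
--
-- 	# Preprocess the pattern (calculate lps[] array)
-- 	computeLPSArray(pat, M, lps)
--
-- 	i = 0 # index for txt[]
-- 	while i < N:
-- 		if pat[j] == txt[i]:
-- 			i += 1
-- 			j += 1
--
-- 		if j == M: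
-- 			hasil = ("Found pattern at index " + str(i-j))
-- 			j = lps[j-1]
--
-- 		# mismatch after j matches
-- 		elif i < N and pat[j] != txt[i]:
-- 			# Do not match lps[0..lps[j-1]] characters,
-- 			# they will match anyway
-- 			if j != 0:
-- 				j = lps[j-1]
-- 			else:
-- 				i += 1
--
-- 	return hasil
--
-- def computeLPSArray(pat, M, lps):
-- 	len = 0 # length of the previous longest prefix suffix
--
-- 	lps[0] # lps[0] is always 0
-- 	i = 1
--
-- 	# the loop calculates lps[i] for i = 1 to M-1
-- 	while i < M:
-- 		if pat[i]== pat[len]: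
-- 			len += 1
-- 			lps[i] = len
-- 			i += 1
-- 		else:
-- 			# This is tricky. Consider the example.
-- 			# AAACAAAA and i = 7. The idea is similar
-- 			# to search step.
-- 			if len != 0:
-- 				len = lps[len-1]
--
-- 				# Also, note that we do not increment i here
-- 			else:
-- 				lps[i] = 0
-- 				i += 1
--
-- def scanning(pat, soup): #pat, soup
-- 	for i in range(len(pat)):
-- 		hasilAkhir = KMPSearch(pat[i], str(soup))
-- 		if hasilAkhir == "":
-- 			hasilAkhir = ("Not Found")
-- 			pattern = "-"
-- 			#return hasilAkhir, pattern
-- 		else: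
-- 			#print (hasilAkhir+" \""+pat[i]+"\"")
-- 			pattern = pat[i]
-- 			break
-- 			#return hasilAkhir, pattern
--
-- 	return hasilAkhir, pattern
-- ===== SOURCE B (Python) =====
-- def scanning(pat, soup):
--     txt = str(soup)
--     for p in pat:
--         idx = txt.rfind(p)
--         if idx != -1:
--             return "Found pattern at index " + str(idx), p
--     return "Not Found", "-"
-- ===== Notes on version B (the rewrite author's own statement) =====
-- stated objective: simpler
-- what changed: The whole hand-written KMP machinery (failure table plus search loop that overwrites its result on every match, so it reports the last occurrence) is replaced by one str.rfind call per pattern with an early return.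
import Mathlib
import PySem

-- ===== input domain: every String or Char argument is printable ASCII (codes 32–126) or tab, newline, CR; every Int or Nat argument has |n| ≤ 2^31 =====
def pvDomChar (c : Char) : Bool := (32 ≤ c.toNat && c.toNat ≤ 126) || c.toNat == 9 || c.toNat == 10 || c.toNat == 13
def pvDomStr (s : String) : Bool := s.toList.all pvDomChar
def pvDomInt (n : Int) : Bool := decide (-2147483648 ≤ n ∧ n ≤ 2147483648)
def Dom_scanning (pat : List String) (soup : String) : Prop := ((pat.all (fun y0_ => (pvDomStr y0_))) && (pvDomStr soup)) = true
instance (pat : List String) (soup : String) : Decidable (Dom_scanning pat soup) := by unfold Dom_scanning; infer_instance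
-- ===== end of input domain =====

-- B replaces A's hand-written KMP (failure table + search loop that overwrites its result on
-- every match, hence reports the LAST occurrence) by one str.rfind call per pattern.

-- ===== PORT A =====
-- computeLPSArray's while loop; the Python list `lps` is threaded as state, `fuel` only makes
-- the recursion total (2*M+1 steps always suffice, proved in the lemmas below).
-- Indexing uses getD; it is exact here because every index the loop uses is in range.
def lpsLoop (p : List Char) (M : Nat) : Nat → Nat → Nat → List Nat → List Nat
  | 0, _, _, lps => lps
  | fuel + 1, i, len, lps =>
    if i < M then
      if p.getD i ' ' = p.getD len ' ' then
        lpsLoop p M fuel (i + 1) (len + 1) (lps.set i (len + 1))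
      else if len ≠ 0 then
        lpsLoop p M fuel i (lps.getD (len - 1) 0) lps
      else
        lpsLoop p M fuel (i + 1) len (lps.set i 0)
    else lps

-- computeLPSArray(pat, M, lps) with lps = [0]*M
def computeLPS (p : List Char) (M : Nat) : List Nat :=
  lpsLoop p M (2 * M + 1) 1 0 (List.replicate M 0)

-- KMPSearch's while loop (fuel = 2*N+1 steps always suffice; proved below).
def kmpLoop (p t : List Char) (M N : Nat) (lps : List Nat) :
    Nat → Nat → Nat → String → String
  | 0, _, _, hasil => hasil
  | fuel + 1, i, j, hasil =>
    if i < N then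
      -- `if pat[j] == txt[i]: i += 1; j += 1`
      let ij := if p.getD j ' ' = t.getD i ' ' then (i + 1, j + 1) else (i, j)
      if ij.2 = M then
        kmpLoop p t M N lps fuel ij.1 (lps.getD (ij.2 - 1) 0)
          ("Found pattern at index " ++ PySem.Int.toStr ((ij.1 : Int) - (ij.2 : Int)))
      else if ij.1 < N ∧ p.getD ij.2 ' ' ≠ t.getD ij.1 ' ' then
        if ij.2 ≠ 0 then kmpLoop p t M N lps fuel ij.1 (lps.getD (ij.2 - 1) 0) hasil
        else kmpLoop p t M N lps fuel (ij.1 + 1) ij.2 hasil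
      else kmpLoop p t M N lps fuel ij.1 ij.2 hasil
    else hasil

def KMPSearchPort (pat txt : String) : String :=
  let p := pat.toList
  let t := txt.toList
  let M := p.length
  let N := t.length
  let lps := computeLPS p M
  kmpLoop p t M N lps (2 * N + 1) 0 0 ""

-- scanning's for-loop with break; on the last pattern the not-found branch sets the
-- returned pair. `pat = []` is outside Pre_ (Python raises UnboundLocalError there).
def scanning (pat : List String) (soup : String) : String × String :=
  match pat with
  | [] => ("", "")
  | [p] =>
    let h := KMPSearchPort p soup
    if h = "" then ("Not Found", "-") else (h, p)
  | p :: rest =>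
    let h := KMPSearchPort p soup
    if h = "" then scanning rest soup else (h, p)

-- ===== PORT B =====
def scanning_alt (pat : List String) (soup : String) : String × String :=
  match pat with
  | [] => ("Not Found", "-")
  | p :: rest =>
    let idx := PySem.Str.rfind soup p
    if idx ≠ -1 then ("Found pattern at index " ++ PySem.Int.toStr idx, p)
    else scanning_alt rest soup

-- ===== PRECONDITION & SPEC =====
-- Pre_ is exactly A's return domain: A raises UnboundLocalError on pat = [] and IndexError
-- (computeLPSArray's `lps[0]` on an empty table) as soon as the loop reaches an empty pattern
-- string, i.e. when every earlier pattern is nonempty and absent from soup.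
-- (the first disjunct implies the second; it is kept as a fast path for deciding Pre_)
def Pre_scanning (pat : List String) (soup : String) : Prop :=
  -- admitted e.g. for pat = ["ab", "b"], soup = "xbxab" or pat = ["tn", "ab"], soup = "ttnab";
  -- excluded e.g. for pat = [] or pat = ["tn", "", "ab"], soup = "xbz" (A raises IndexError
  -- as soon as the empty pattern is searched, since no earlier pattern occurs in soup)
  pat ≠ [] ∧ ("" ∉ pat ∨
    (pat.dropWhile (fun q => decide (q ≠ "") && !(PySem.Str.isIn q soup))).head? ≠ some "")
instance (pat : List String) (soup : String) : Decidable (Pre_scanning pat soup) := by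
  unfold Pre_scanning; infer_instance

def pvWitness_scanning : List String × String := (["ab", "b"], "xbxab")

def Spec_scanning (pat : List String) (soup : String) (out : String × String) : Prop :=
  out = scanning_alt pat soup
instance (pat : List String) (soup : String) (out : String × String) :
    Decidable (Spec_scanning pat soup out) := by unfold Spec_scanning; infer_instance

-- ===== CLAIM (what is proved, stated in full; the proofs are below) =====
def Claim_equal_scanning : Prop := ∀ (pat : List String) (soup : String),
  Dom_scanning pat soup → Pre_scanning pat soup → Spec_scanning pat soup (scanning pat soup)

-- ===== LEMMAS AND PROOFS =====

-- `p occurs in t starting at k`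
abbrev MatchAt (p t : List Char) (k : Nat) : Prop := p <+: t.drop k

-- `an occurrence of p in t ends at e`  (for p ≠ [] this forces p.length ≤ e)
abbrev EndsAt (p t : List Char) (e : Nat) : Prop := p.length ≤ e ∧ p <:+ t.take e

-- the value of A's `hasil` after scanning t.take i: the last occurrence end ≤ i, rendered
def hasilSpec (p t : List Char) (i : Nat) : String :=
  if EndsAt p t (Nat.findGreatest (EndsAt p t) i) then
    "Found pattern at index " ++
      PySem.Int.toStr ((Nat.findGreatest (EndsAt p t) i : Int) - (p.length : Int))
  else ""

-- length of the longest proper border (prefix = suffix) of l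
def lpb (l : List Char) : Nat :=
  Nat.findGreatest (fun k => k < l.length ∧ l.take k <:+ l) l.length

lemma concat_suffix_concat (a b : List Char) (x y : Char) :
    a ++ [x] <:+ b ++ [y] ↔ x = y ∧ a <:+ b := by
  constructor
  · intro h; rw [← List.reverse_prefix] at h; simp at h; exact h
  · rintro ⟨rfl, h2⟩; rw [← List.reverse_prefix]; simp; exact h2

lemma lpb_spec (l : List Char) (h : l ≠ []) : lpb l < l.length ∧ l.take (lpb l) <:+ l := by
  have h0 : 0 < l.length ∧ l.take 0 <:+ l := by
    simp [List.length_pos_iff, h]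
  exact Nat.findGreatest_spec (P := fun k => k < l.length ∧ l.take k <:+ l) (Nat.zero_le _) h0

lemma lpb_ge (l : List Char) (k : Nat) (hk : k < l.length) (hs : l.take k <:+ l) :
    k ≤ lpb l := by
  exact Nat.le_findGreatest (Nat.le_of_lt hk) ⟨hk, hs⟩

-- a suffix of a suffix by length
lemma suffix_of_suffix_le {a b c : List Char} (ha : a <:+ c) (hb : b <:+ c)
    (h : a.length ≤ b.length) : a <:+ b :=
  List.suffix_of_suffix_length_le ha hb h

-- extension of a partial match by one character
lemma ext_iff (p t : List Char) (k i : Nat) (hk : k < p.length) (hi : i < t.length) :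
    p.take (k + 1) <:+ t.take (i + 1) ↔
      (p.take k <:+ t.take i ∧ p.getD k ' ' = t.getD i ' ') := by
  rw [List.take_succ_eq_append_getElem hk, List.take_succ_eq_append_getElem hi,
    concat_suffix_concat, List.getD_eq_getElem _ _ hk, List.getD_eq_getElem _ _ hi, and_comm]

-- borders of p.take j
lemma border_le_lpb (p : List Char) (k j : Nat) (hkj : k < j) (hj : j ≤ p.length)
    (hs : p.take k <:+ p.take j) : k ≤ lpb (p.take j) := by
  apply lpb_ge
  · simp only [List.length_take]; omega
  · rwa [List.take_take, min_eq_left (Nat.le_of_lt hkj)]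

lemma take_nonempty (p : List Char) (n : Nat) (hn : 0 < n) (hp : n ≤ p.length) :
    p.take n ≠ [] := by
  intro h
  have h2 : (p.take n).length = 0 := by rw [h]; rfl
  rw [List.length_take] at h2
  omega

-- the two characterizations of lpb used when the LPS loop writes an entry
lemma lpb_take_succ_match (p : List Char) (i len : Nat) (hlen : len < i) (hi : i < p.length)
    (hJ2 : p.take len <:+ p.take i)
    (hJ3 : ∀ k, len < k → k < i → p.take k <:+ p.take i → p.getD k ' ' ≠ p.getD i ' ')
    (hc : p.getD i ' ' = p.getD len ' ') :
    lpb (p.take (i + 1)) = len + 1 := by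
  have hiM : i + 1 ≤ p.length := hi
  have hne : p.take (i+1) ≠ [] := take_nonempty p (i+1) (by omega) hiM
  have hsfx : p.take (len+1) <:+ p.take (i+1) :=
    (ext_iff p p len i (by omega) hi).mpr ⟨hJ2, hc.symm⟩
  have hle : len + 1 ≤ lpb (p.take (i+1)) :=
    border_le_lpb p (len+1) (i+1) (by omega) hiM hsfx
  have hub : lpb (p.take (i+1)) ≤ len + 1 := by
    by_contra hgt
    rw [not_le] at hgt
    obtain ⟨hlt, hsf⟩ := lpb_spec (p.take (i+1)) hne
    have hklen : lpb (p.take (i+1)) < i + 1 := by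
      rw [List.length_take] at hlt; omega
    have hksfx : p.take (lpb (p.take (i+1))) <:+ p.take (i+1) := by
      rwa [List.take_take, min_eq_left (by omega)] at hsf
    obtain ⟨k', hkk⟩ : ∃ k', lpb (p.take (i+1)) = k' + 1 :=
      ⟨lpb (p.take (i+1)) - 1, by omega⟩
    rw [hkk] at hksfx
    have := (ext_iff p p k' i (by omega) hi).mp hksfx
    exact hJ3 k' (by omega) (by omega) this.1 this.2
  omega

lemma lpb_take_succ_zero (p : List Char) (i : Nat) (hi0 : 0 < i) (hi : i < p.length)
    (hJ3 : ∀ k, 0 < k → k < i → p.take k <:+ p.take i → p.getD k ' ' ≠ p.getD i ' ')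
    (hc : p.getD i ' ' ≠ p.getD 0 ' ') :
    lpb (p.take (i + 1)) = 0 := by
  have hiM : i + 1 ≤ p.length := hi
  have hne : p.take (i+1) ≠ [] := take_nonempty p (i+1) (by omega) hiM
  by_contra hgt
  obtain ⟨hlt, hsf⟩ := lpb_spec (p.take (i+1)) hne
  have hk0 : 0 < lpb (p.take (i+1)) := Nat.pos_of_ne_zero hgt
  have hklen : lpb (p.take (i+1)) < i + 1 := by
    rw [List.length_take] at hlt; omega
  have hksfx : p.take (lpb (p.take (i+1))) <:+ p.take (i+1) := by
    rwa [List.take_take, min_eq_left (by omega)] at hsf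
  obtain ⟨k', hkk⟩ : ∃ k', lpb (p.take (i+1)) = k' + 1 :=
    ⟨lpb (p.take (i+1)) - 1, by omega⟩
  rw [hkk] at hksfx
  have hext := (ext_iff p p k' i (by omega) hi).mp hksfx
  rcases Nat.eq_zero_or_pos k' with h0 | hpos
  · rw [h0] at hext
    exact hc hext.2.symm
  · exact hJ3 k' hpos (by omega) hext.1 hext.2

lemma getD_set_self (l : List Nat) (i : Nat) (v : Nat) (h : i < l.length) :
    (l.set i v).getD i 0 = v := by
  simp [List.getD_eq_getElem?_getD, h]

lemma getD_set_ne (l : List Nat) (i k : Nat) (v : Nat) (h : k ≠ i) :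
    (l.set i v).getD k 0 = l.getD k 0 := by
  simp [List.getD_eq_getElem?_getD, Ne.symm h]

lemma lpsLoop_spec (p : List Char) (M : Nat) (hM : M = p.length) :
    ∀ fuel i len lps, 1 ≤ i → i ≤ M → len < i → lps.length = M →
      (∀ k, k < i → lps.getD k 0 = lpb (p.take (k + 1))) →
      p.take len <:+ p.take i →
      (∀ k, len < k → k < i → p.take k <:+ p.take i → p.getD k ' ' ≠ p.getD i ' ') →
      2 * (M - i) + len + 1 ≤ fuel →
      ∀ k, k < M → (lpsLoop p M fuel i len lps).getD k 0 = lpb (p.take (k + 1)) := by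
  intro fuel
  induction fuel with
  | zero => intro i len lps _ _ _ _ _ _ _ hfuel; omega
  | succ fuel ih =>
    intro i len lps hi1 hiM hlen hlps hJ1 hJ2 hJ3 hfuel k hk
    by_cases hiM' : i < M
    · have hip : i < p.length := by omega
      rw [lpsLoop]
      simp only [if_pos hiM']
      by_cases hc : p.getD i ' ' = p.getD len ' '
      · rw [if_pos hc]
        have hlpb : lpb (p.take (i+1)) = len + 1 :=
          lpb_take_succ_match p i len hlen hip hJ2 hJ3 hc
        refine ih (i+1) (len+1) (lps.set i (len+1)) (by omega) (by omega) (by omega)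
          (by simp [hlps]) ?_ ?_ ?_ (by omega) k hk
        · intro k' hk'
          rcases Nat.lt_or_ge k' i with hki | hki
          · rw [getD_set_ne lps i k' _ (by omega)]; exact hJ1 k' hki
          · have : k' = i := by omega
            subst this
            rw [getD_set_self lps k' _ (by omega), hlpb]
        · exact (ext_iff p p len i (by omega) hip).mpr ⟨hJ2, hc.symm⟩
        · intro k' hk'l hk'i hsfx
          exfalso
          have := border_le_lpb p k' (i+1) hk'i (by omega) hsfx
          omega
      · rw [if_neg hc]
        by_cases hl0 : len ≠ 0
        · rw [if_pos hl0]
          have hlen1 : 1 ≤ len := by omega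
          have hlval : lps.getD (len-1) 0 = lpb (p.take len) := by
            have := hJ1 (len-1) (by omega)
            rwa [Nat.sub_add_cancel hlen1] at this
          have htne : p.take len ≠ [] := take_nonempty p len (by omega) (by omega)
          obtain ⟨hlt, hsf⟩ := lpb_spec (p.take len) htne
          have hlt' : lpb (p.take len) < len := by
            rw [List.length_take] at hlt; omega
          have hsf' : p.take (lpb (p.take len)) <:+ p.take len := by
            rwa [List.take_take, min_eq_left (by omega)] at hsf
          rw [hlval]
          refine ih i (lpb (p.take len)) lps hi1 hiM (by omega) hlps hJ1
            (hsf'.trans hJ2) ?_ (by omega) k hk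
          intro k' hk'l hk'i hsfx
          rcases Nat.lt_trichotomy k' len with hkl | hkl | hkl
          · exfalso
            have hkb : p.take k' <:+ p.take len :=
              suffix_of_suffix_le hsfx hJ2
                (by simp [List.length_take]; omega)
            have := border_le_lpb p k' len hkl (by omega) hkb
            omega
          · subst hkl; exact fun hh => hc hh.symm
          · exact hJ3 k' hkl hk'i hsfx
        · rw [not_not] at hl0
          subst hl0
          rw [if_neg (by simp)]
          have hlpb : lpb (p.take (i+1)) = 0 :=
            lpb_take_succ_zero p i (by omega) hip hJ3 hc
          refine ih (i+1) 0 (lps.set i 0) (by omega) (by omega) (by omega)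
            (by simp [hlps]) ?_ (by simp) ?_ (by omega) k hk
          · intro k' hk'
            rcases Nat.lt_or_ge k' i with hki | hki
            · rw [getD_set_ne lps i k' _ (by omega)]; exact hJ1 k' hki
            · have : k' = i := by omega
              subst this
              rw [getD_set_self lps k' _ (by omega), hlpb]
          · intro k' hk'l hk'i hsfx
            exfalso
            have := border_le_lpb p k' (i+1) hk'i (by omega) hsfx
            omega
    · have : i = M := by omega
      subst this
      rw [lpsLoop, if_neg hiM']
      exact hJ1 k hk

lemma computeLPS_spec (p : List Char) (hp : p ≠ []) :
    ∀ k, k < p.length → (computeLPS p p.length).getD k 0 = lpb (p.take (k + 1)) := by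
  intro k hk
  have hM1 : 1 ≤ p.length := by
    cases p with
    | nil => exact absurd rfl hp
    | cons a l => simp
  have hlpb1 : lpb (p.take 1) = 0 := by
    cases p with
    | nil => exact absurd rfl hp
    | cons a l => simp [lpb, Nat.findGreatest]
  refine lpsLoop_spec p p.length rfl (2 * p.length + 1) 1 0 (List.replicate p.length 0)
    le_rfl hM1 (by omega) (by simp) ?_ (by simp) (by omega) (by omega) k hk
  intro k' hk'
  have : k' = 0 := by omega
  subst this
  simp [hlpb1]

lemma hasilSpec_succ_of_not (p t : List Char) (i : Nat) (h : ¬ EndsAt p t (i + 1)) :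
    hasilSpec p t (i + 1) = hasilSpec p t i := by
  unfold hasilSpec
  rw [Nat.findGreatest_succ, if_neg h]

lemma hasilSpec_of_endsAt (p t : List Char) (i : Nat) (h : EndsAt p t i) :
    hasilSpec p t i =
      "Found pattern at index " ++ PySem.Int.toStr ((i : Int) - (p.length : Int)) := by
  have hfg : Nat.findGreatest (EndsAt p t) i = i :=
    le_antisymm (Nat.findGreatest_le (P := EndsAt p t) i) (Nat.le_findGreatest le_rfl h)
  unfold hasilSpec
  rw [hfg, if_pos h]

lemma kmpLoop_spec (p t : List Char) (M N : Nat) (lps : List Nat)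
    (hM : M = p.length) (hN : N = t.length) (hM1 : 1 ≤ M)
    (hlps : ∀ k, k < M → lps.getD k 0 = lpb (p.take (k + 1))) :
    ∀ fuel i j hasil, j ≤ i → i ≤ N → j < M →
      p.take j <:+ t.take i →
      (∀ k, j < k → k < M → p.take k <:+ t.take i → i < N ∧ p.getD k ' ' ≠ t.getD i ' ') →
      hasil = hasilSpec p t i →
      2 * (N - i) + j + 1 ≤ fuel →
      kmpLoop p t M N lps fuel i j hasil = hasilSpec p t N := by
  intro fuel
  induction fuel with
  | zero => intro i j hasil _ _ _ _ _ _ hfuel; omega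
  | succ fuel ih =>
    intro i j hasil hji hiN hjM hI2 hI3 hI4 hfuel
    by_cases hiN' : i < N
    · have hit : i < t.length := by omega
      have hjp : j < p.length := by omega
      have hp0 : p ≠ [] := by
        intro hnil
        rw [hnil] at hM
        simp at hM
        omega
      rw [kmpLoop, if_pos hiN']
      by_cases hc : p.getD j ' ' = t.getD i ' '
      · rw [if_pos hc]
        have hI2' : p.take (j+1) <:+ t.take (i+1) :=
          (ext_iff p t j i hjp hit).mpr ⟨hI2, hc⟩
        by_cases hrec : j + 1 = M
        · rw [if_pos hrec]
          have hfull : p <:+ t.take (i+1) := by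
            have := hI2'
            rwa [hrec, hM, List.take_length] at this
          have hMle : p.length ≤ i + 1 := by
            have := hfull.length_le
            rw [List.length_take] at this
            omega
          have hE : EndsAt p t (i+1) := ⟨hMle, hfull⟩
          obtain ⟨hjn_lt, hjn_sfx⟩ := lpb_spec p hp0
          have hlval : lps.getD (j + 1 - 1) 0 = lpb p := by
            have := hlps j hjM
            rw [Nat.add_sub_cancel, this, hrec, hM, List.take_length]
          rw [hlval]
          refine ih (i+1) (lpb p) _ (by omega) (by omega) (by omega)
            (hjn_sfx.trans hfull) ?_ ?_ (by omega)
          · intro k hk1 hk2 hsfx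
            exfalso
            have hkp : p.take k <:+ p :=
              suffix_of_suffix_le hsfx hfull
                (by rw [List.length_take]; omega)
            have := lpb_ge p k (by omega) hkp
            omega
          · rw [hasilSpec_of_endsAt p t (i+1) hE, hrec, hM]
        · rw [if_neg hrec]
          have hmax : ∀ k, j + 1 < k → k ≤ p.length → ¬ p.take k <:+ t.take (i+1) := by
            intro k hk hkM hsfx
            obtain ⟨k', rfl⟩ : ∃ k', k = k' + 1 := ⟨k - 1, by omega⟩
            have hext := (ext_iff p t k' i (by omega) hit).mp hsfx
            exact (hI3 k' (by omega) (by omega) hext.1).2 hext.2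
          have hnE : ¬ EndsAt p t (i+1) := by
            intro hE
            exact hmax p.length (by omega) le_rfl (by rw [List.take_length]; exact hE.2)
          have hspec1 : hasilSpec p t (i+1) = hasilSpec p t i :=
            hasilSpec_succ_of_not p t i hnE
          by_cases hm2 : i + 1 < N ∧ p.getD (j+1) ' ' ≠ t.getD (i+1) ' '
          · rw [if_pos hm2, if_pos (show j + 1 ≠ 0 by omega)]
            have hlval : lps.getD (j + 1 - 1) 0 = lpb (p.take (j+1)) := by
              rw [Nat.add_sub_cancel]
              exact hlps j hjM
            have htne : p.take (j+1) ≠ [] := take_nonempty p (j+1) (by omega) (by omega)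
            obtain ⟨hlt, hsf⟩ := lpb_spec (p.take (j+1)) htne
            have hlt' : lpb (p.take (j+1)) < j + 1 := by
              rw [List.length_take] at hlt; omega
            have hsf' : p.take (lpb (p.take (j+1))) <:+ p.take (j+1) := by
              rwa [List.take_take, min_eq_left (by omega)] at hsf
            rw [hlval]
            refine ih (i+1) (lpb (p.take (j+1))) _ (by omega) (by omega) (by omega)
              (hsf'.trans hI2') ?_ (hI4.trans hspec1.symm) (by omega)
            intro k hk1 hk2 hsfx
            rcases Nat.lt_trichotomy k (j+1) with hkl | hkl | hkl
            · exfalso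
              have hkb : p.take k <:+ p.take (j+1) :=
                suffix_of_suffix_le hsfx hI2'
                  (by rw [List.length_take, List.length_take]; omega)
              have := border_le_lpb p k (j+1) hkl (by omega) hkb
              omega
            · subst hkl; exact hm2
            · exact absurd hsfx (hmax k hkl (by omega))
          · rw [if_neg hm2]
            refine ih (i+1) (j+1) _ (by omega) (by omega) (by omega) hI2' ?_
              (hI4.trans hspec1.symm) (by omega)
            intro k hk1 hk2 hsfx
            exact absurd hsfx (hmax k hk1 (by omega))
      · rw [if_neg hc, if_neg (show ¬ (j = M) by omega),
          if_pos (show i < N ∧ p.getD j ' ' ≠ t.getD i ' ' from ⟨hiN', hc⟩)]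
        by_cases hj0 : j ≠ 0
        · rw [if_pos hj0]
          have hj1 : 1 ≤ j := by omega
          have hlval : lps.getD (j - 1) 0 = lpb (p.take j) := by
            have := hlps (j-1) (by omega)
            rwa [Nat.sub_add_cancel hj1] at this
          have htne : p.take j ≠ [] := take_nonempty p j (by omega) (by omega)
          obtain ⟨hlt, hsf⟩ := lpb_spec (p.take j) htne
          have hlt' : lpb (p.take j) < j := by
            rw [List.length_take] at hlt; omega
          have hsf' : p.take (lpb (p.take j)) <:+ p.take j := by
            rwa [List.take_take, min_eq_left (by omega)] at hsf
          rw [hlval]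
          refine ih i (lpb (p.take j)) _ (by omega) (by omega) (by omega)
            (hsf'.trans hI2) ?_ hI4 (by omega)
          intro k hk1 hk2 hsfx
          rcases Nat.lt_trichotomy k j with hkl | hkl | hkl
          · exfalso
            have hkb : p.take k <:+ p.take j :=
              suffix_of_suffix_le hsfx hI2
                (by rw [List.length_take, List.length_take]; omega)
            have := border_le_lpb p k j hkl (by omega) hkb
            omega
          · subst hkl; exact ⟨hiN', hc⟩
          · exact hI3 k hkl hk2 hsfx
        · rw [if_neg hj0]
          have hj : j = 0 := by omega
          subst hj
          have hmax0 : ∀ k, 0 < k → k ≤ p.length → ¬ p.take k <:+ t.take (i+1) := by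
            intro k hk0 hkM hsfx
            obtain ⟨k', rfl⟩ : ∃ k', k = k' + 1 := ⟨k - 1, by omega⟩
            have hext := (ext_iff p t k' i (by omega) hit).mp hsfx
            rcases Nat.eq_zero_or_pos k' with h0 | hpos
            · rw [h0] at hext
              exact hc hext.2
            · exact (hI3 k' hpos (by omega) hext.1).2 hext.2
          have hnE : ¬ EndsAt p t (i+1) := by
            intro hE
            exact hmax0 p.length (by omega) le_rfl (by rw [List.take_length]; exact hE.2)
          refine ih (i+1) 0 _ (by omega) (by omega) (by omega) (by simp) ?_
            (hI4.trans (hasilSpec_succ_of_not p t i hnE).symm) (by omega)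
          intro k hk1 hk2 hsfx
          exact absurd hsfx (hmax0 k hk1 (by omega))
    · have : i = N := by omega
      subst this
      rw [kmpLoop, if_neg hiN']
      exact hI4

lemma KMPSearchPort_eq (pat txt : String) (hp : pat.toList ≠ []) :
    KMPSearchPort pat txt = hasilSpec pat.toList txt.toList txt.toList.length := by
  have hM1 : 1 ≤ pat.toList.length := List.length_pos_iff.mpr hp
  refine kmpLoop_spec pat.toList txt.toList pat.toList.length txt.toList.length
    (computeLPS pat.toList pat.toList.length) rfl rfl hM1 (computeLPS_spec pat.toList hp)
    (2 * txt.toList.length + 1) 0 0 "" le_rfl (Nat.zero_le _) (by omega)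
    (by simp) ?_ ?_ (by omega)
  · intro k hk1 hk2 hsfx
    exfalso
    rw [List.take_zero, List.suffix_nil] at hsfx
    exact take_nonempty pat.toList k hk1 (by omega) hsfx
  · unfold hasilSpec
    rw [Nat.findGreatest_zero, if_neg (fun hE => by have := hE.1; omega)]

-- rfind.go returns the greatest start ≤ k at which p occurs
lemma rfind_go_eq (s sub : List Char) (k : Nat) :
    PySem.Chars.rfind.go s sub k =
      if ∃ j, j ≤ k ∧ MatchAt sub s j then
        ((Nat.findGreatest (MatchAt sub s) k : Nat) : Int)
      else -1 := by
  induction k with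
  | zero =>
    simp only [PySem.Chars.rfind.go, MatchAt, Nat.findGreatest_zero, Nat.le_zero]
    by_cases h : sub <+: s
    · simp [List.isPrefixOf_iff_prefix, h]
    · simp [List.isPrefixOf_iff_prefix, h]
  | succ k ih =>
    show (if sub.isPrefixOf (s.drop (k+1)) = true then ((k+1 : Nat) : Int)
          else PySem.Chars.rfind.go s sub k) = _
    by_cases h : MatchAt sub s (k+1)
    · have hfg : Nat.findGreatest (MatchAt sub s) (k+1) = k+1 := by
        have h1 := Nat.findGreatest_le (P := MatchAt sub s) (k+1)
        have h2 := Nat.le_findGreatest (le_refl (k+1)) h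
        omega
      have hpre : sub.isPrefixOf (List.drop (k+1) s) = true :=
        List.isPrefixOf_iff_prefix.mpr h
      have hx : ∃ j, j ≤ k+1 ∧ MatchAt sub s j := ⟨k+1, le_refl _, h⟩
      rw [if_pos hpre, if_pos hx, hfg]
    · have hfg : Nat.findGreatest (MatchAt sub s) (k+1) = Nat.findGreatest (MatchAt sub s) k := by
        rw [Nat.findGreatest_succ]; simp [h]
      have hex : (∃ j, j ≤ k+1 ∧ MatchAt sub s j) ↔ (∃ j, j ≤ k ∧ MatchAt sub s j) := by
        constructor
        · rintro ⟨j, hj, hm⟩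
          rcases Nat.lt_or_ge j (k+1) with hlt | hge
          · exact ⟨j, by omega, hm⟩
          · have : j = k+1 := by omega
            rw [this] at hm; exact absurd hm h
        · rintro ⟨j, hj, hm⟩; exact ⟨j, by omega, hm⟩
      have hpre : ¬ sub.isPrefixOf (s.drop (k+1)) = true := by
        simpa [List.isPrefixOf_iff_prefix, MatchAt] using h
      rw [if_neg hpre, ih, hfg]
      by_cases he : ∃ j, j ≤ k ∧ MatchAt sub s j
      · rw [if_pos he, if_pos (hex.mpr he)]
      · rw [if_neg he, if_neg (fun hh => he (hex.mp hh))]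

-- the per-pattern bridge: A's KMP result vs B's rfind
lemma endsAt_iff (p t : List Char) (e : Nat) (he : e ≤ t.length) :
    EndsAt p t e ↔ p.length ≤ e ∧ MatchAt p t (e - p.length) := by
  unfold EndsAt MatchAt
  constructor
  · rintro ⟨hMe, hsfx⟩
    refine ⟨hMe, ?_⟩
    have heq := List.suffix_iff_eq_drop.mp hsfx
    rw [List.length_take] at heq
    have hmin : min e t.length - p.length = e - p.length := by omega
    rw [hmin, List.drop_take] at heq
    have h2 : e - (e - p.length) = p.length := by omega
    rw [h2] at heq
    exact List.prefix_iff_eq_take.mpr heq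
  · rintro ⟨hMe, hpre⟩
    refine ⟨hMe, ?_⟩
    have heq := List.prefix_iff_eq_take.mp hpre
    have hsplit : t.take e = t.take (e - p.length) ++ (t.drop (e - p.length)).take p.length := by
      have h3 : e = (e - p.length) + p.length := by omega
      calc t.take e = t.take ((e - p.length) + p.length) := by rw [← h3]
        _ = t.take (e - p.length) ++ (t.drop (e - p.length)).take p.length := List.take_add
    rw [hsplit, ← heq]
    exact List.suffix_append _ _

lemma hasil_eq_rfind (p t : List Char) (hp : p ≠ []) :
    hasilSpec p t t.length =
      if PySem.Chars.rfind t p ≠ -1 then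
        "Found pattern at index " ++ PySem.Int.toStr (PySem.Chars.rfind t p)
      else "" := by
  have hM1 : 1 ≤ p.length := List.length_pos_iff.mpr hp
  have hgo : PySem.Chars.rfind t p = PySem.Chars.rfind.go t p t.length := rfl
  rw [hgo, rfind_go_eq]
  by_cases hex : ∃ j, j ≤ t.length ∧ MatchAt p t j
  · rw [if_pos hex]
    obtain ⟨j0, hj0, hm0⟩ := hex
    have hgm : MatchAt p t (Nat.findGreatest (MatchAt p t) t.length) :=
      Nat.findGreatest_spec hj0 hm0
    have hgmle : Nat.findGreatest (MatchAt p t) t.length ≤ t.length :=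
      Nat.findGreatest_le (P := MatchAt p t) t.length
    have hroom : Nat.findGreatest (MatchAt p t) t.length + p.length ≤ t.length := by
      have := hgm.length_le
      rw [List.length_drop] at this
      omega
    have hE : EndsAt p t (Nat.findGreatest (MatchAt p t) t.length + p.length) :=
      (endsAt_iff p t _ hroom).mpr ⟨by omega, by rwa [Nat.add_sub_cancel]⟩
    have hgE_E : EndsAt p t (Nat.findGreatest (EndsAt p t) t.length) :=
      Nat.findGreatest_spec hroom hE
    have hgE_ge : Nat.findGreatest (MatchAt p t) t.length + p.length ≤
        Nat.findGreatest (EndsAt p t) t.length :=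
      Nat.le_findGreatest hroom hE
    have hgE_le : Nat.findGreatest (EndsAt p t) t.length ≤ t.length :=
      Nat.findGreatest_le (P := EndsAt p t) t.length
    have hback := (endsAt_iff p t _ hgE_le).mp hgE_E
    have hgE_le' : Nat.findGreatest (EndsAt p t) t.length - p.length ≤
        Nat.findGreatest (MatchAt p t) t.length :=
      Nat.le_findGreatest (by omega) hback.2
    have hgE_eq : Nat.findGreatest (EndsAt p t) t.length =
        Nat.findGreatest (MatchAt p t) t.length + p.length := by omega
    unfold hasilSpec
    rw [if_pos hgE_E, if_pos (show ((Nat.findGreatest (MatchAt p t) t.length : Nat) : Int) ≠ -1 by omega)]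
    have harg : ((Nat.findGreatest (EndsAt p t) t.length : Nat) : Int) - (p.length : Int) =
        ((Nat.findGreatest (MatchAt p t) t.length : Nat) : Int) := by omega
    rw [harg]
  · rw [if_neg hex, if_neg (by simp)]
    unfold hasilSpec
    rw [if_neg]
    intro hE
    have hle : Nat.findGreatest (EndsAt p t) t.length ≤ t.length :=
      Nat.findGreatest_le (P := EndsAt p t) t.length
    have := (endsAt_iff p t _ hle).mp hE
    exact hex ⟨_, by omega, this.2⟩

lemma found_ne_empty (s : String) : "Found pattern at index " ++ s ≠ "" := by
  intro h; have := congrArg String.toList h; simp at this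

-- ===== VERDICT (by name: the statement is the Claim_ definition above) =====
lemma toList_ne_nil_of_ne_empty (p : String) (h : p ≠ "") : p.toList ≠ [] :=
  fun hl => h (String.toList_eq_nil_iff.mp hl)

lemma scanning_cons_eq (p : String) (soup : String) (rest : List String) (hpne : p ≠ "")
    (hrec : PySem.Chars.rfind soup.toList p.toList = -1 →
      scanning rest soup = scanning_alt rest soup ∨ rest = []) :
    scanning (p :: rest) soup = scanning_alt (p :: rest) soup := by
  have hplist : p.toList ≠ [] := toList_ne_nil_of_ne_empty p hpne
  have hk := KMPSearchPort_eq p soup hplist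
  have hr := hasil_eq_rfind p.toList soup.toList hplist
  have hstr : PySem.Str.rfind soup p = PySem.Chars.rfind soup.toList p.toList :=
    PySem.Str.rfind_eq soup p
  by_cases hne : PySem.Chars.rfind soup.toList p.toList = -1
  · have hempty : KMPSearchPort p soup = "" := by
      rw [hk, hr, hne]
      simp
    cases rest with
    | nil =>
      show (if KMPSearchPort p soup = "" then ("Not Found", "-") else (KMPSearchPort p soup, p)) = _
      rw [if_pos hempty]
      simp only [scanning_alt]
      rw [if_neg (by rw [hstr, hne]; simp)]
    | cons q rest' =>
      show (if KMPSearchPort p soup = "" then scanning (q :: rest') soup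
            else (KMPSearchPort p soup, p)) = _
      rw [if_pos hempty]
      simp only [scanning_alt]
      rw [if_neg (by rw [hstr, hne]; simp)]
      rcases hrec hne with hrec | hrec
      · exact hrec
      · exact absurd hrec (by simp)
  · have hfound : KMPSearchPort p soup =
        "Found pattern at index " ++ PySem.Int.toStr (PySem.Chars.rfind soup.toList p.toList) := by
      rw [hk, hr, if_pos hne]
    have hnonempty : KMPSearchPort p soup ≠ "" := by
      rw [hfound]; exact found_ne_empty _
    have hB : scanning_alt (p :: rest) soup =
        ("Found pattern at index " ++ PySem.Int.toStr (PySem.Str.rfind soup p), p) := by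
      simp only [scanning_alt]
      rw [if_pos (by rw [hstr]; exact hne)]
    cases rest with
    | nil =>
      show (if KMPSearchPort p soup = "" then ("Not Found", "-") else (KMPSearchPort p soup, p)) = _
      rw [if_neg hnonempty, hB, hfound, hstr]
    | cons q rest' =>
      show (if KMPSearchPort p soup = "" then scanning (q :: rest') soup
            else (KMPSearchPort p soup, p)) = _
      rw [if_neg hnonempty, hB, hfound, hstr]

lemma isIn_false_of_rfind_neg (p t : List Char) (hp : p ≠ [])
    (h : PySem.Chars.rfind t p = -1) : PySem.Chars.isIn p t = false := by
  by_contra hin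
  rw [Bool.not_eq_false] at hin
  obtain ⟨j, hj⟩ := (PySem.Chars.exists_prefix_drop_iff_isIn p t).mpr hin
  rcases Nat.lt_or_ge t.length j with hgt | hle
  · rw [List.drop_eq_nil_of_le (by omega), List.prefix_nil] at hj
    exact hp hj
  · have hgo : PySem.Chars.rfind t p = PySem.Chars.rfind.go t p t.length := rfl
    rw [hgo, rfind_go_eq, if_pos ⟨j, hle, hj⟩] at h
    omega

lemma pre_head_ne (p : String) (rest : List String) (soup : String)
    (hpre : Pre_scanning (p :: rest) soup) : p ≠ "" := by
  intro h
  subst h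
  rcases hpre.2 with h2 | h2
  · exact h2 (List.mem_cons_self ..)
  · exact h2 (by simp)

lemma pre_tail (p : String) (rest : List String) (soup : String)
    (hpre : Pre_scanning (p :: rest) soup) (hnotin : PySem.Str.isIn p soup = false)
    (hrne : rest ≠ []) : Pre_scanning rest soup := by
  have hpne : p ≠ "" := pre_head_ne p rest soup hpre
  have hnotin' : PySem.Chars.isIn p.toList soup.toList = false := by
    rw [← PySem.Str.isIn_eq]; exact hnotin
  refine ⟨hrne, ?_⟩
  rcases hpre.2 with h2 | h2
  · exact Or.inl (fun hm => h2 (List.mem_cons_of_mem _ hm))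
  · refine Or.inr ?_
    have hdw : (p :: rest).dropWhile (fun q => decide (q ≠ "") && !(PySem.Str.isIn q soup)) =
        rest.dropWhile (fun q => decide (q ≠ "") && !(PySem.Str.isIn q soup)) := by
      simp [hpne, hnotin']
    exact hdw ▸ h2

theorem scanning_spec : Claim_equal_scanning := by
  unfold Claim_equal_scanning
  intro pat soup hdom
  clear hdom
  unfold Spec_scanning
  induction pat with
  | nil => intro hpre; exact absurd rfl hpre.1
  | cons p rest ih =>
    intro hpre
    have hpne : p ≠ "" := pre_head_ne p rest soup hpre
    apply scanning_cons_eq p soup rest hpne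
    intro hne
    cases rest with
    | nil => exact Or.inr rfl
    | cons q rest' =>
      have hplist : p.toList ≠ [] := toList_ne_nil_of_ne_empty p hpne
      have hisin : PySem.Str.isIn p soup = false := by
        rw [PySem.Str.isIn_eq]
        exact isIn_false_of_rfind_neg p.toList soup.toList hplist hne
      exact Or.inl (ih (pre_tail p (q :: rest') soup hpre hisin (by simp)))
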